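-- pv_equiv track=rewrite | github.com/firebase/firebase-ios-sdk | scripts/binary_to_array.py | source
-- ===== SOURCE A (Python) =====
-- WIDTH = 12
--
-- def source(namespaces, array_name, array_size_name, fileid, filename,
--            input_bytes, include_name):
--   """Return a C/C++ source file for the given array.
--
--   Args:
--     namespaces: List of namespaces, outer to inner.
--     array_name: Name of the array.
--     array_size_name: Name of the array size constant.
--     fileid: Name of the identifier containing the filename.
--     filename: The original data filename itself.
--     input_bytes: Binary data to put into the array.
--     include_name: Name of the corresponding header file to include.
--
--   Returns:
--     A string containing the C/C++ source file.
--   """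
--   data = []
--   data.extend([
--       "// Copyright 2019 Google Inc. All Rights Reserved.",
--       "",
--       "#include <cstdlib>",
--       "",
--       "#include \"%s\"" % include_name,
--       ""
--   ])
--   if namespaces:
--     data.extend([
--         "namespace %s {" % ns for ns in namespaces
--     ])
--   else:
--     data.extend([
--         "#if defined(__cplusplus)",
--         "extern \"C\" {",
--         "#endif  // defined(__cplusplus)"])
--
--   data.extend([
--       "",
--       "extern const size_t %s;" % array_size_name,
--       "extern const char %s[];" % fileid,
--       "extern const unsigned char %s[];" % array_name, "",
--       "const unsigned char %s[] = {" % array_name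
--   ])
--   length = len(input_bytes)
--   line = ""
--   for idx in range(0, length):
--     if idx % WIDTH == 0:
--       line += "    "
--     else:
--       line += " "
--     line += "0x%02x," % input_bytes[idx]
--     if idx % WIDTH == WIDTH - 1:
--       data.append(line)
--       line = ""
--   data.append(line)
--   data.append("    0x00  // Extra \\0 to make it a C string")
--
--   data.extend([
--       "};",
--       "",
--       "const size_t %s =" % array_size_name,
--       "    sizeof(%s) - 1;" % array_name,
--       "",
--       "const char %s[] = \"%s\";" % (fileid, filename),
--       "",
--   ])
--
--   if namespaces:
--     data.extend([
--         "}  // namespace %s" % ns for ns in namespaces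
--     ][::-1])  # close namespaces in reverse order
--   else:
--     data.extend([
--         "#if defined(__cplusplus)",
--         "}  // extern \"C\"",
--         "#endif  // defined(__cplusplus)"
--     ])
--   data.extend([
--       ""
--   ])
--   return data
-- ===== SOURCE B (Python) =====
-- WIDTH = 12
--
--
-- def _hex_line(chunk):
--   return "    " + " ".join("0x%02x," % b for b in chunk)
--
--
-- def _chunk_lines(bs):
--   """Byte lines: one joined line per chunk of WIDTH; a trailing "" if no residue."""
--   q = len(bs) // WIDTH
--   lines = [_hex_line(bs[k * WIDTH:(k + 1) * WIDTH]) for k in range(q)]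
--   rest = bs[q * WIDTH:]
--   lines.append(_hex_line(rest) if rest else "")
--   return lines
--
--
-- def source(namespaces, array_name, array_size_name, fileid, filename,
--            input_bytes, include_name):
--   """Return a C/C++ source file for the given array (declarative sections)."""
--   opened = (["namespace %s {" % ns for ns in namespaces] if namespaces else
--             ["#if defined(__cplusplus)",
--              "extern \"C\" {",
--              "#endif  // defined(__cplusplus)"])
--   closed = (["}  // namespace %s" % ns for ns in namespaces[::-1]] if namespaces
--             else
--             ["#if defined(__cplusplus)",
--              "}  // extern \"C\"",
--              "#endif  // defined(__cplusplus)"])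
--   sections = [
--       ["// Copyright 2019 Google Inc. All Rights Reserved.",
--        "",
--        "#include <cstdlib>",
--        "",
--        "#include \"%s\"" % include_name,
--        ""],
--       opened,
--       ["",
--        "extern const size_t %s;" % array_size_name,
--        "extern const char %s[];" % fileid,
--        "extern const unsigned char %s[];" % array_name,
--        "",
--        "const unsigned char %s[] = {" % array_name],
--       _chunk_lines(list(input_bytes)),
--       ["    0x00  // Extra \\0 to make it a C string",
--        "};",
--        "",
--        "const size_t %s =" % array_size_name,
--        "    sizeof(%s) - 1;" % array_name,
--        "",
--        "const char %s[] = \"%s\";" % (fileid, filename),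
--        ""],
--       closed,
--       [""],
--   ]
--   return [line for sec in sections for line in sec]
-- ===== Notes on version B (the rewrite author's own statement) =====
-- stated objective: simpler
-- what changed: B assembles the file declaratively as a flat list of seven sections and computes the byte lines by structural recursion on chunks of WIDTH (slice, join, recurse), replacing A's single mutable list with a per-index character accumulator and modulo flush checks.
import Mathlib
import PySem

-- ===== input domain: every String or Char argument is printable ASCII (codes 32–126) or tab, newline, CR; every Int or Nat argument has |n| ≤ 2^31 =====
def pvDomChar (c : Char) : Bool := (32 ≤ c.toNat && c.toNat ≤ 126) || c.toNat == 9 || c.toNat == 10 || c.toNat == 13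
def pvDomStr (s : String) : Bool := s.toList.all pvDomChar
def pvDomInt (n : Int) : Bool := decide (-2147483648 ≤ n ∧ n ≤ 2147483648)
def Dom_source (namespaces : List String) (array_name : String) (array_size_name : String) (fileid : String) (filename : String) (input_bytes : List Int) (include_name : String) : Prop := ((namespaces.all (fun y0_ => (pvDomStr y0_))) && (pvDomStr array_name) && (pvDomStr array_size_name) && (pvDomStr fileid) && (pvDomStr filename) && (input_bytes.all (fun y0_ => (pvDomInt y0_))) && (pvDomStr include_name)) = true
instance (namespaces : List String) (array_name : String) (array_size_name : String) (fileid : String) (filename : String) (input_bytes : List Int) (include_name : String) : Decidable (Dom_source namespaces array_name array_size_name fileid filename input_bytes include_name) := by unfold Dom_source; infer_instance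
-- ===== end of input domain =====

-- ===== PORT A =====
-- B is simpler: it assembles the file as a flat list of declarative sections and
-- computes the byte lines by structural recursion on chunks of WIDTH, replacing
-- A's mutable-list accumulation with per-index modulo flush checks. ("%02x" hex
-- formatting is ported by hand below and is exact, including Python's
-- sign-then-zero-pad rule.)

-- shared helper: "0x%02x," % b (identical format expression in both Pythons)
def hexDigit (n : Nat) : Char := if n < 10 then Char.ofNat (48 + n) else Char.ofNat (87 + n)

def hexNatAux : Nat → List Char → List Char
  | 0, acc => acc
  | n+1, acc => hexNatAux ((n+1)/16) (hexDigit ((n+1)%16) :: acc)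

-- "%02x" % n : digits zero-padded to width 2; negatives get '-' then (unpadded to width 1) digits
def hexStr (n : Int) : String :=
  if n < 0 then "-" ++ String.ofList (hexNatAux n.natAbs [])
  else
    let ds := if n = 0 then ['0'] else hexNatAux n.natAbs []
    String.ofList (if ds.length < 2 then '0' :: ds else ds)

def hexByte (b : Int) : String := "0x" ++ hexStr b ++ ","

-- A's byte loop: for idx in range(len(input_bytes)): accumulate `line`, flush on idx % 12 == 11.
-- Returns (data, line) as left after the loop.
def srcLoop : List Int → Nat → String → List String → (List String × String)
  | [], _, line, data => (data, line)
  | b :: rest, idx, line, data =>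
    let line := (if idx % 12 == 0 then line ++ "    " else line ++ " ") ++ hexByte b
    if idx % 12 == 11 then srcLoop rest (idx + 1) "" (data ++ [line])
    else srcLoop rest (idx + 1) line data

def source (namespaces : List String) (array_name : String) (array_size_name : String) (fileid : String) (filename : String) (input_bytes : List Int) (include_name : String) : List String :=
  let data : List String :=
    ["// Copyright 2019 Google Inc. All Rights Reserved.",
     "",
     "#include <cstdlib>",
     "",
     "#include \"" ++ include_name ++ "\"",
     ""]
  let data := data ++
    (if namespaces ≠ [] then
      namespaces.map (fun ns => "namespace " ++ ns ++ " {")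
    else
      ["#if defined(__cplusplus)",
       "extern \"C\" {",
       "#endif  // defined(__cplusplus)"])
  let data := data ++
    ["",
     "extern const size_t " ++ array_size_name ++ ";",
     "extern const char " ++ fileid ++ "[];",
     "extern const unsigned char " ++ array_name ++ "[];", "",
     "const unsigned char " ++ array_name ++ "[] = {"]
  let p := srcLoop input_bytes 0 "" data
  let data := p.1
  let line := p.2
  let data := data ++ [line]
  let data := data ++ ["    0x00  // Extra \\0 to make it a C string"]
  let data := data ++
    ["};",
     "",
     "const size_t " ++ array_size_name ++ " =",
     "    sizeof(" ++ array_name ++ ") - 1;",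
     "",
     "const char " ++ fileid ++ "[] = \"" ++ filename ++ "\";",
     ""]
  let data := data ++
    (if namespaces ≠ [] then
      -- [::-1] (slice with step -1) is exactly List.reverse
      (namespaces.map (fun ns => "}  // namespace " ++ ns)).reverse
    else
      ["#if defined(__cplusplus)",
       "}  // extern \"C\"",
       "#endif  // defined(__cplusplus)"])
  data ++ [""]

-- ===== PORT B =====
-- hand port of " ".join(strings), exact
def joinSp : List String → String
  | [] => ""
  | [s] => s
  | s :: ss => s ++ " " ++ joinSp ss

-- _hex_line: '    ' + ' '.join('0x%02x,' % b for b in chunk)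
def hexLine (chunk : List Int) : String := "    " ++ joinSp (chunk.map hexByte)

-- _chunk_lines: one joined line per chunk of WIDTH (bs[k*12:(k+1)*12] and
-- bs[q*12:] are nonnegative in-range slices, ported as drop/take — exact here)
def chunkLines (bs : List Int) : List String :=
  let q := bs.length / 12
  let lines := (List.range q).map (fun k => hexLine ((bs.drop (k * 12)).take 12))
  let rest := bs.drop (q * 12)
  lines ++ [if rest.isEmpty then "" else hexLine rest]

def source_alt (namespaces : List String) (array_name : String) (array_size_name : String) (fileid : String) (filename : String) (input_bytes : List Int) (include_name : String) : List String :=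
  let «opened» : List String :=
    if namespaces ≠ [] then namespaces.map (fun ns => "namespace " ++ ns ++ " {")
    else
      ["#if defined(__cplusplus)",
       "extern \"C\" {",
       "#endif  // defined(__cplusplus)"]
  let closed : List String :=
    -- namespaces[::-1] is exactly List.reverse
    if namespaces ≠ [] then namespaces.reverse.map (fun ns => "}  // namespace " ++ ns)
    else
      ["#if defined(__cplusplus)",
       "}  // extern \"C\"",
       "#endif  // defined(__cplusplus)"]
  let sections : List (List String) :=
    [["// Copyright 2019 Google Inc. All Rights Reserved.",
      "",
      "#include <cstdlib>",
      "",
      "#include \"" ++ include_name ++ "\"",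
      ""],
     «opened»,
     ["",
      "extern const size_t " ++ array_size_name ++ ";",
      "extern const char " ++ fileid ++ "[];",
      "extern const unsigned char " ++ array_name ++ "[];",
      "",
      "const unsigned char " ++ array_name ++ "[] = {"],
     chunkLines input_bytes,
     ["    0x00  // Extra \\0 to make it a C string",
      "};",
      "",
      "const size_t " ++ array_size_name ++ " =",
      "    sizeof(" ++ array_name ++ ") - 1;",
      "",
      "const char " ++ fileid ++ "[] = \"" ++ filename ++ "\";",
      ""],
     closed,
     [""]]
  -- [line for sec in sections for line in sec]
  sections.flatten

-- ===== PRECONDITION & SPEC =====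
def Spec_source (namespaces : List String) (array_name : String) (array_size_name : String) (fileid : String) (filename : String) (input_bytes : List Int) (include_name : String) (out : List String) : Prop := out = source_alt namespaces array_name array_size_name fileid filename input_bytes include_name
instance (namespaces : List String) (array_name : String) (array_size_name : String) (fileid : String) (filename : String) (input_bytes : List Int) (include_name : String) (out : List String) : Decidable (Spec_source namespaces array_name array_size_name fileid filename input_bytes include_name out) := by unfold Spec_source; infer_instance

-- ===== CLAIM (what is proved, stated in full; the proofs are below) =====
def Claim_equal_source : Prop := ∀ (namespaces : List String) (array_name : String) (array_size_name : String) (fileid : String) (filename : String) (input_bytes : List Int) (include_name : String), Dom_source namespaces array_name array_size_name fileid filename input_bytes include_name → Spec_source namespaces array_name array_size_name fileid filename input_bytes include_name (source namespaces array_name array_size_name fileid filename input_bytes include_name)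

-- ===== LEMMAS AND PROOFS =====

-- proof-only chunk recursion: what both byte-line computations amount to
def chunkRec (xs : List Int) : List String :=
  if _h : 12 <= xs.length then hexLine (xs.take 12) :: chunkRec (xs.drop 12)
  else [if xs.isEmpty then "" else hexLine xs]
termination_by xs.length
decreasing_by simp [List.length_drop]; omega

-- B's range-indexed chunk lines equal the chunk recursion
theorem chunkAux_eq_rec (xs : List Int) :
    (List.range (xs.length / 12)).map (fun k => hexLine ((xs.drop (k * 12)).take 12))
      ++ [if (xs.drop (xs.length / 12 * 12)).isEmpty then ""
          else hexLine (xs.drop (xs.length / 12 * 12))]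
      = chunkRec xs := by
  induction hn : xs.length using Nat.strong_induction_on generalizing xs with
  | _ n ih =>
  subst hn
  rw [chunkRec]
  by_cases hlen : 12 <= xs.length
  · rw [dif_pos hlen]
    have hq : xs.length / 12 = (xs.drop 12).length / 12 + 1 := by
      simp only [List.length_drop]; omega
    have hmap : ∀ k : Nat,
        ((fun k => hexLine ((xs.drop (k * 12)).take 12)) ∘ Nat.succ) k
          = (fun k => hexLine (((xs.drop 12).drop (k * 12)).take 12)) k := by
      intro k
      simp only [Function.comp, List.drop_drop]
      have h12 : Nat.succ k * 12 = 12 + k * 12 := by omega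
      rw [h12]
    have hdt : xs.drop (((xs.drop 12).length / 12 + 1) * 12)
        = (xs.drop 12).drop ((xs.drop 12).length / 12 * 12) := by
      rw [List.drop_drop]
      congr 1
      omega
    rw [hq, List.range_succ_eq_map, List.map_cons, List.map_map,
        List.map_congr_left (fun k _ => hmap k), hdt]
    simp only [Nat.zero_mul, List.drop_zero, List.cons_append]
    congr 1
    exact ih (xs.drop 12).length (by simp only [List.length_drop]; omega) (xs.drop 12) rfl
  · rw [dif_neg hlen]
    have hq : xs.length / 12 = 0 := by omega
    simp [hq]

theorem chunkLines_eq_rec (xs : List Int) : chunkLines xs = chunkRec xs := by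
  simpa [chunkLines] using chunkAux_eq_rec xs

-- trailing contribution of bytes inside a line (each preceded by one space)
def contrib : List Int → String
  | [] => ""
  | b :: bs => " " ++ hexByte b ++ contrib bs

theorem srcLoop_cons (b : Int) (rest : List Int) (idx : Nat) (line : String) (data : List String) :
    srcLoop (b :: rest) idx line data
      = (if idx % 12 == 11 then
          srcLoop rest (idx + 1) "" (data ++ [(if idx % 12 == 0 then line ++ "    " else line ++ " ") ++ hexByte b])
        else
          srcLoop rest (idx + 1) ((if idx % 12 == 0 then line ++ "    " else line ++ " ") ++ hexByte b) data) := rfl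

theorem joinSp_cons (y : Int) (ys : List Int) :
    joinSp ((y :: ys).map hexByte) = hexByte y ++ contrib ys := by
  induction ys generalizing y with
  | nil => simp [joinSp, contrib]
  | cons z zs ih =>
    simp only [List.map_cons, joinSp, contrib] at *
    rw [ih z]
    simp [String.append_assoc]

-- in-line part of the loop: from a non-chunk-start index to the end of the chunk
theorem srcLoop_fill (ys rest : List Int) (idx : Nat) (line : String) (data : List String)
    (h0 : idx % 12 ≠ 0) (h12 : idx % 12 + ys.length = 12) :
    srcLoop (ys ++ rest) idx line data
      = srcLoop rest (idx + ys.length) "" (data ++ [line ++ contrib ys]) := by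
  induction ys generalizing idx line data with
  | nil => simp at h12; omega
  | cons y ys ih =>
    have hmod : idx % 12 < 12 := Nat.mod_lt _ (by omega)
    simp only [List.length_cons] at h12
    simp only [List.cons_append]
    rw [srcLoop_cons]
    have c0 : (idx % 12 == 0) = false := by simp; omega
    cases ys with
    | nil =>
      simp only [List.length_nil] at h12
      have c11 : (idx % 12 == 11) = true := by simp; omega
      simp [c0, c11, contrib, String.append_assoc]
    | cons z zs =>
      simp only [List.length_cons] at h12
      have c11 : (idx % 12 == 11) = false := by simp; omega
      have h1 : (idx + 1) % 12 = idx % 12 + 1 := by omega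
      simp only [c0, c11, if_false, Bool.false_eq_true]
      rw [ih (idx + 1) _ data (by omega) (by simp only [List.length_cons]; omega)]
      simp only [List.length_cons, contrib, String.append_assoc]
      have : idx + 1 + (zs.length + 1) = idx + (zs.length + 1 + 1) := by omega
      rw [this]

-- short tail: the loop ends inside a chunk, leaving the partial line
theorem srcLoop_tail (ys : List Int) (idx : Nat) (line : String) (data : List String)
    (h0 : idx % 12 ≠ 0) (hlt : idx % 12 + ys.length < 12) :
    srcLoop ys idx line data = (data, line ++ contrib ys) := by
  induction ys generalizing idx line with
  | nil => simp [srcLoop, contrib]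
  | cons y ys ih =>
    simp only [List.length_cons] at hlt
    rw [srcLoop_cons]
    have c0 : (idx % 12 == 0) = false := by simp; omega
    have c11 : (idx % 12 == 11) = false := by simp; omega
    have h1 : (idx + 1) % 12 = idx % 12 + 1 := by omega
    simp only [c0, c11, if_false, Bool.false_eq_true]
    rw [ih (idx + 1) _ (by omega) (by omega)]
    simp [contrib, String.append_assoc]

-- main loop invariant: at a chunk-start index the loop produces exactly B's chunk lines
theorem srcLoop_eq_chunkRec (xs : List Int) (idx : Nat) (data : List String)
    (h0 : idx % 12 = 0) :
    (srcLoop xs idx "" data).1 ++ [(srcLoop xs idx "" data).2] = data ++ chunkRec xs := by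
  induction hn : xs.length using Nat.strong_induction_on generalizing xs idx data with
  | _ n ih =>
  cases xs with
  | nil => simp [srcLoop, chunkRec]
  | cons y ys =>
    simp only [List.length_cons] at hn
    rw [chunkRec, srcLoop_cons]
    have c0 : (idx % 12 == 0) = true := by simp [h0]
    have c11 : (idx % 12 == 11) = false := by simp [h0]
    simp only [c0, c11, if_true, if_false, Bool.false_eq_true]
    by_cases hlen : 12 ≤ (y :: ys).length
    · rw [dif_pos hlen]
      simp only [List.length_cons] at hlen
      have hl11 : (ys.take 11).length = 11 := by simp; omega
      have h1 : (idx + 1) % 12 = 1 := by omega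
      conv_lhs => rw [show ys = ys.take 11 ++ ys.drop 11 from (List.take_append_drop 11 ys).symm]
      rw [srcLoop_fill _ _ _ _ _ (by omega) (by rw [hl11]; omega)]
      rw [ih (ys.drop 11).length (by simp; omega) _ _ _ (by omega) rfl]
      have htake : (y :: ys).take 12 = y :: ys.take 11 := rfl
      have hdrop : (y :: ys).drop 12 = ys.drop 11 := rfl
      rw [htake, hdrop, hexLine, joinSp_cons]
      simp [String.append_assoc]
    · rw [dif_neg hlen]
      simp only [List.length_cons] at hlen
      cases ys with
      | nil => simp [srcLoop, hexLine, joinSp]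
      | cons z zs =>
        rw [srcLoop_tail _ _ _ _ (by omega) (by simp at hlen ⊢; omega)]
        rw [hexLine, joinSp_cons]
        simp [String.append_assoc]

-- ===== VERDICT (by name: the statement is the Claim_ definition above) =====
theorem source_spec : Claim_equal_source := by
  intro namespaces array_name array_size_name fileid filename input_bytes include_name _
  unfold Spec_source source source_alt
  simp only [List.flatten, List.map_reverse, chunkLines_eq_rec]
  rw [srcLoop_eq_chunkRec _ _ _ rfl]
  simp [List.append_assoc]
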